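-- pv_equiv track=rewrite | github.com/ggalvezb/Proceso-de-Decision-de-Markov-con-Q-Learning | codigo.py | rewards
-- ===== SOURCE A (Python) =====
-- import copy
--
-- def rewards(n_states):
-- 	restar=5
-- 	quedarse=[]
-- 	for j in range(n_states):
-- 		temp=[]
-- 		for i in range(n_states):
-- 			temp.append(n_states-restar)
-- 			restar-=1
-- 		quedarse.append(temp)
-- 		restar=5
-- 		restar+=j + 1
-- 	irse=copy.deepcopy(quedarse)
-- 	for k in range(len(irse)):
-- 		for l in range(len(irse)):
-- 			irse[k][l]=irse[k][l]*-1
-- 	rewards=[]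
--
-- 	for m in range(len(quedarse)):
-- 		temp2=[]
-- 		temp2.append(quedarse[m])
-- 		temp2.append(irse[m])
-- 		rewards.append(temp2)
-- 	return(rewards)
-- ===== SOURCE B (Python) =====
-- def rewards(n_states):
--     n = n_states
--     # Toeplitz band: every stay-value n-5-j+i depends only on the diagonal d=i-j,
--     # so precompute the 2n-1 distinct values once; band[k] = -4 + k = n-5 + (k-(n-1)).
--     band = list(range(-4, 2 * n - 5))
--     nband = [-x for x in band]
--     # row j of the stay matrix is the window band[n-1-j : 2n-1-j]; leave is the same window of nband
--     return [[band[n - 1 - j: 2 * n - 1 - j], nband[n - 1 - j: 2 * n - 1 - j]]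
--             for j in range(n)]
-- ===== Notes on version B (the rewrite author's own statement) =====
-- stated objective: alternative
-- what changed: B exploits that the stay matrix is Toeplitz (entry depends only on i-j): it precomputes the single band of 2n-1 distinct values (and its negation) once, and each row pair is just two slices of that band, replacing A's per-cell counter loops, deepcopy, element-wise negation pass and assembly loop.
import Mathlib
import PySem

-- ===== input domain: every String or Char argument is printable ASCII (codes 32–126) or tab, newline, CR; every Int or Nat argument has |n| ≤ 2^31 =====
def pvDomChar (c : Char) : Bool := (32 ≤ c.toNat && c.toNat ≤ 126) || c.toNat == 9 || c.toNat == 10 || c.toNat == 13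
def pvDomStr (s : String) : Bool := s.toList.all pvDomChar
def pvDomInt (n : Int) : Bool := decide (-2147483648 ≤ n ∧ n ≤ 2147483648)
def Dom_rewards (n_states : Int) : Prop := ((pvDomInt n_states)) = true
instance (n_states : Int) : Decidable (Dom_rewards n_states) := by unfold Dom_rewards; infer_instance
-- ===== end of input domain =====

-- B exploits the Toeplitz structure (each entry depends only on i-j): it precomputes the single
-- band of 2n-1 values and its negation once, and every row pair is two slices of those bands
-- (objective: alternative algorithm; replaces A's counter loops, deepcopy, negation and assembly passes).

-- ===== PORT A =====
-- literal transliteration of A: mutable loop state becomes fold state; list indexing/assignment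
-- uses pyGetD/pySetD (indices produced by the loops are always in range, as in the Python).
def rewards (n_states : Int) : List (List (List Int)) :=
  let built :=
    (PySem.List.pyRange 0 n_states 1).foldl
      (fun (st : List (List Int) × Int) j =>
        let inner :=
          (PySem.List.pyRange 0 n_states 1).foldl
            (fun (st2 : List Int × Int) _i => (st2.1 ++ [n_states - st2.2], st2.2 - 1))
            ([], st.2)
        (st.1 ++ [inner.1], 5 + j + 1))
      ([], 5)
  let quedarse := built.1
  let irse :=
    (PySem.List.pyRange 0 (quedarse.length : Int) 1).foldl
      (fun acc k =>
        (PySem.List.pyRange 0 (quedarse.length : Int) 1).foldl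
          (fun acc2 l =>
            PySem.List.pySetD acc2 k
              (PySem.List.pySetD (PySem.List.pyGetD acc2 k []) l
                (PySem.List.pyGetD (PySem.List.pyGetD acc2 k []) l 0 * -1)))
          acc)
      quedarse
  (PySem.List.pyRange 0 (quedarse.length : Int) 1).foldl
    (fun acc m => acc ++ [[PySem.List.pyGetD quedarse m [], PySem.List.pyGetD irse m []]])
    []

-- ===== PORT B =====
-- literal transliteration of B: the band of stay-values, its negation, then one slice pair per row
def rewards_alt (n_states : Int) : List (List (List Int)) :=
  let band := PySem.List.pyRange (-4) (2 * n_states - 5) 1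
  let nband := band.map (fun x => -x)
  (PySem.List.pyRange 0 n_states 1).foldl
    (fun out j =>
      out ++ [[PySem.List.slice band (some (n_states - 1 - j)) (some (2 * n_states - 1 - j)),
               PySem.List.slice nband (some (n_states - 1 - j)) (some (2 * n_states - 1 - j))]])
    []

-- ===== PRECONDITION & SPEC =====
def Spec_rewards (n_states : Int) (out : List (List (List Int))) : Prop := out = rewards_alt n_states
instance (n_states : Int) (out : List (List (List Int))) : Decidable (Spec_rewards n_states out) := by unfold Spec_rewards; infer_instance

-- ===== CLAIM (what is proved, stated in full; the proofs are below) =====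
def Claim_equal_rewards : Prop := ∀ (n_states : Int), Dom_rewards n_states → Spec_rewards n_states (rewards n_states)

-- ===== LEMMAS AND PROOFS =====

-- inner counter loop of A: each step appends n - restar and decrements restar (elements ignored)
theorem pv_innerTemp (n : Int) (L : List Int) : ∀ (temp : List Int) (r : Int),
    L.foldl (fun (st2 : List Int × Int) _i => (st2.1 ++ [n - st2.2], st2.2 - 1)) (temp, r)
      = (temp ++ (List.range L.length).map (fun (i : Nat) => n - r + (i : Int)), r - L.length) := by
  induction L with
  | nil => intro temp r; simp
  | cons x xs ih =>
      intro temp r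
      simp only [List.foldl_cons, ih, List.length_cons, List.range_succ_eq_map, List.map_cons]
      simp only [Prod.mk.injEq]
      constructor
      · simp only [List.append_assoc, List.singleton_append, List.map_map,
          Nat.cast_zero, add_zero]
        apply congrArg
        apply congrArg
        apply List.map_congr_left
        intro a _
        simp only [Function.comp_apply]
        push_cast
        ring
      · push_cast; ring

-- outer build loop of A: after t iterations quedarse holds rows j < t with entries n-(5+j)+i
theorem pv_build (n : Int) (L : List Int) (t : Nat) :
    (PySem.List.pyRange 0 (t : Int) 1).foldl
      (fun (st : List (List Int) × Int) j =>
        let inner :=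
          L.foldl
            (fun (st2 : List Int × Int) _i => (st2.1 ++ [n - st2.2], st2.2 - 1))
            ([], st.2)
        (st.1 ++ [inner.1], 5 + j + 1))
      ([], 5)
    = ((List.range t).map (fun (j : Nat) =>
        (List.range L.length).map
          (fun (i : Nat) => n - (5 + (j : Int)) + (i : Int))),
       5 + (t : Int)) := by
  induction t with
  | zero => simp [PySem.List.pyRange_one_eq_nil]
  | succ t ih =>
      have hc : ((t + 1 : Nat) : Int) = (t : Int) + 1 := by push_cast; ring
      rw [hc, PySem.List.pyRange_one_succ_right (by positivity), List.foldl_append, ih]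
      simp only [List.foldl_cons, List.foldl_nil, pv_innerTemp, List.nil_append,
        List.range_succ, List.map_append, List.map_cons, List.map_nil]
      simp only [Prod.mk.injEq]
      constructor
      · trivial
      · ring

-- one set-at-k/get-at-k loop over the rows equals a single row update (k in range)
theorem pv_factor {α : Type} (d : α) (h' : α → Int → α) (L' : List Int) :
    ∀ (acc : List α) (k : Nat), k < acc.length →
    L'.foldl (fun a l => PySem.List.pySetD a (k : Int) (h' (PySem.List.pyGetD a (k : Int) d) l)) acc
      = PySem.List.pySetD acc (k : Int) (L'.foldl h' (PySem.List.pyGetD acc (k : Int) d)) := by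
  induction L' with
  | nil =>
      intro acc k hk
      simp only [List.foldl_nil, PySem.List.pySetD_natCast, PySem.List.pyGetD_natCast]
      rw [List.getD_eq_getElem _ _ hk, List.set_getElem_self]
  | cons x xs ih =>
      intro acc k hk
      simp only [List.foldl_cons]
      rw [ih _ k (by simpa using hk)]
      simp only [PySem.List.pySetD_natCast, PySem.List.pyGetD_natCast, List.set_set]
      congr 1
      rw [List.getD_eq_getElem _ _ (by simpa using hk), List.getElem_set_self,
        List.getD_eq_getElem _ _ hk]

-- a fold over range(t) that rewrites slot k to g(slot k) maps g over the first t slots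
theorem pv_set_map {α : Type} (d : α) (g : α → α) (F : List α → Int → List α)
    (hF : ∀ (acc : List α) (k : Nat), k < acc.length →
      F acc (k : Int) = PySem.List.pySetD acc (k : Int) (g (PySem.List.pyGetD acc (k : Int) d)))
    (t : Nat) (xs : List α) (ht : t ≤ xs.length) :
    (PySem.List.pyRange 0 (t : Int) 1).foldl F xs
      = (xs.take t).map g ++ xs.drop t := by
  induction t with
  | zero => simp [PySem.List.pyRange_one_eq_nil]
  | succ t ih =>
      have hc : ((t + 1 : Nat) : Int) = (t : Int) + 1 := by push_cast; ring
      have ht' : t ≤ xs.length := by omega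
      have htlt : t < xs.length := by omega
      rw [hc, PySem.List.pyRange_one_succ_right (by positivity), List.foldl_append,
        List.foldl_cons, List.foldl_nil, ih ht']
      have hlen : ((xs.take t).map g ++ xs.drop t).length = xs.length := by
        simp; omega
      rw [hF _ t (by omega)]
      have hpref : ((xs.take t).map g).length = t := by simp; omega
      have hget : PySem.List.pyGetD ((xs.take t).map g ++ xs.drop t) (t : Int) d = xs[t] := by
        rw [PySem.List.pyGetD_natCast, List.getD_eq_getElem _ _ (by omega)]
        rw [List.getElem_append_right (by omega)]
        simp [Nat.min_eq_left ht']
      rw [hget, PySem.List.pySetD_natCast]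
      rw [List.set_append_right _ _ (by omega), hpref]
      rw [List.drop_eq_getElem_cons htlt]
      rw [Nat.sub_self, List.set_cons_zero, List.take_add_one, List.getElem?_eq_getElem htlt]
      simp only [Option.toList_some, List.map_append, List.map_cons, List.map_nil,
        List.append_assoc, List.singleton_append]

-- slicing commutes with mapping (nonnegative bounds)
theorem pv_slice_map (f : Int → Int) (xs : List Int) (a b : Int) (ha : 0 ≤ a) (hb : 0 ≤ b) :
    PySem.List.slice (xs.map f) (some a) (some b)
      = (PySem.List.slice xs (some a) (some b)).map f := by
  rw [PySem.List.slice_toNat, PySem.List.slice_toNat, List.map_take, List.map_drop]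
  all_goals assumption

-- the window band[t-1-k : 2t-1-k] of the band is exactly row k of the stay matrix
theorem pv_sliceBand (t k : Nat) (hk : k < t) :
    PySem.List.slice ((List.range (2 * t - 1)).map (fun (q : Nat) => (-4 : Int) + q))
        (some ((t : Int) - 1 - k)) (some (2 * (t : Int) - 1 - k))
      = (List.range t).map (fun (i : Nat) => (t : Int) - 5 - k + i) := by
  have ha : (t : Int) - 1 - k = ((t - 1 - k : Nat) : Int) := by omega
  have hb : 2 * (t : Int) - 1 - k = ((2 * t - 1 - k : Nat) : Int) := by omega
  rw [ha, hb, PySem.List.slice_natCast]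
  apply List.ext_getElem
  · simp
    omega
  · intro i h1 h2
    simp only [List.getElem_take, List.getElem_drop, List.getElem_map, List.getElem_range]
    simp only [List.length_take, List.length_drop, List.length_map, List.length_range] at h1 h2
    push_cast
    omega

-- the same window of the negated band is row k of the leave matrix
theorem pv_sliceBandNeg (t k : Nat) (hk : k < t) :
    PySem.List.slice ((List.range (2 * t - 1)).map ((fun (x : Int) => -x) ∘ fun (q : Nat) => (-4 : Int) + q))
        (some ((t : Int) - 1 - k)) (some (2 * (t : Int) - 1 - k))
      = (List.range t).map (fun (i : Nat) => -((t : Int) - 5 - k + i)) := by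
  rw [← List.map_map, pv_slice_map _ _ _ _ (by omega) (by omega),
    pv_sliceBand t k hk, List.map_map]
  rfl

-- the two ports agree on every input
theorem pv_main (n : Int) : rewards n = rewards_alt n := by
  by_cases hneg : n ≤ 0
  · have h0 : PySem.List.pyRange 0 n 1 = [] := by
      rw [PySem.List.pyRange_one]
      have : (n - 0).toNat = 0 := by omega
      rw [this]; simp
    simp [rewards, rewards_alt, h0, PySem.List.pyRange_one]
  · obtain ⟨t, ht⟩ : ∃ t : Nat, (t : Int) = n := ⟨n.toNat, by omega⟩
    have htpos : 1 ≤ t := by omega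
    subst ht
    have hL : (PySem.List.pyRange 0 (t : Int) 1).length = t := by
      rw [PySem.List.length_pyRange_one]; omega
    unfold rewards rewards_alt
    rw [pv_build (t : Int) (PySem.List.pyRange 0 (t : Int) 1) t, hL]
    dsimp only
    simp only [List.length_map, List.length_range]
    have hirse := pv_set_map ([] : List Int)
      (fun row => (PySem.List.pyRange 0 (t : Int) 1).foldl
        (fun r l => PySem.List.pySetD r l (PySem.List.pyGetD r l 0 * -1)) row)
      (fun acc k =>
        (PySem.List.pyRange 0 (t : Int) 1).foldl
          (fun acc2 l =>
            PySem.List.pySetD acc2 k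
              (PySem.List.pySetD (PySem.List.pyGetD acc2 k []) l
                (PySem.List.pyGetD (PySem.List.pyGetD acc2 k []) l 0 * -1)))
          acc)
      (fun acc k hk => pv_factor []
        (fun row l => PySem.List.pySetD row l (PySem.List.pyGetD row l 0 * -1))
        (PySem.List.pyRange 0 (t : Int) 1) acc k hk)
      t
      ((List.range t).map (fun (j : Nat) =>
        (List.range t).map (fun (i : Nat) => (t : Int) - (5 + (j : Int)) + (i : Int))))
      (by simp)
    rw [hirse]
    rw [List.take_of_length_le (by simp)]
    have hdrop : ((List.range t).map (fun (j : Nat) =>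
        (List.range t).map (fun (i : Nat) => (t : Int) - (5 + (j : Int)) + (i : Int)))).drop t = [] := by
      simp [List.drop_eq_nil_iff]
    rw [hdrop, List.append_nil]
    have hrow : ∀ row : List Int, row.length = t →
        (PySem.List.pyRange 0 (t : Int) 1).foldl
          (fun r l => PySem.List.pySetD r l (PySem.List.pyGetD r l 0 * -1)) row
        = row.map (fun x => x * -1) := by
      intro row hlen
      have h := pv_set_map (0 : Int) (fun x => x * -1)
        (fun r l => PySem.List.pySetD r l (PySem.List.pyGetD r l 0 * -1))
        (fun r k hk => rfl) t row (by omega)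
      rw [h, List.take_of_length_le (by omega)]
      have hd : row.drop t = [] := by simp [List.drop_eq_nil_iff, hlen]
      rw [hd, List.append_nil]
    have hI : ((List.range t).map (fun (j : Nat) =>
          (List.range t).map (fun (i : Nat) => (t : Int) - (5 + (j : Int)) + (i : Int)))).map
        (fun row => (PySem.List.pyRange 0 (t : Int) 1).foldl
          (fun r l => PySem.List.pySetD r l (PySem.List.pyGetD r l 0 * -1)) row)
        = (List.range t).map (fun (j : Nat) =>
          ((List.range t).map (fun (i : Nat) => (t : Int) - (5 + (j : Int)) + (i : Int))).map
            (fun x => x * -1)) := by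
      rw [List.map_map]
      exact List.map_congr_left (fun j hj => hrow _ (by simp))
    rw [hI]
    simp only [PySem.List.foldl_append_singleton_eq_map]
    -- B's band is the range-map of values -4+q over q < 2t-1
    have hband : PySem.List.pyRange (-4) (2 * (t : Int) - 5) 1
        = (List.range (2 * t - 1)).map (fun (q : Nat) => (-4 : Int) + q) := by
      rw [PySem.List.pyRange_one]
      have : (2 * (t : Int) - 5 - (-4)).toNat = 2 * t - 1 := by omega
      rw [this]
    have hconv : PySem.List.pyRange 0 (t : Int) 1
        = (List.range t).map (fun (k : Nat) => (k : Int)) := by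
      rw [PySem.List.pyRange_one]
      have h2 : ((t : Int) - 0).toNat = t := by omega
      rw [h2]
      simp
    rw [hconv, hband]
    simp only [List.map_map, List.nil_append]
    apply List.map_congr_left
    intro k hk
    have hk' : k < t := List.mem_range.mp hk
    simp only [Function.comp_apply, PySem.List.pyGetD_natCast]
    rw [PySem.List.getD_map_range _ _ _ _ hk', PySem.List.getD_map_range _ _ _ _ hk']
    rw [pv_sliceBand t k hk', pv_sliceBandNeg t k hk']
    simp only [List.cons.injEq, and_true]
    constructor
    · apply List.map_congr_left
      intro i _
      ring
    · apply List.map_congr_left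
      intro i _
      simp only [Function.comp_apply]
      ring

-- ===== VERDICT (by name: the statement is the Claim_ definition above) =====
theorem rewards_spec : Claim_equal_rewards := by
  intro n _
  exact pv_main n
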